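-- pv_equiv track=rewrite | github.com/seopchan/CodingTest | 프로그래머스/1/76501. 음양 더하기/음양 더하기.py | solution
-- ===== SOURCE A (Python) =====
-- def solution(absolutes, signs):
--     sum_val = 0
--     for i, n in enumerate(absolutes):
--         if signs[i]:
--             sum_val += n
--         else:
--             sum_val -= n
--
--     return sum_val
-- ===== SOURCE B (Python) =====
-- def solution(absolutes, signs):
--     # Divide-and-conquer: signed sum over index segment [lo, hi) by halving.
--     def go(lo, hi):
--         if hi - lo <= 0:
--             return 0
--         if hi - lo == 1:
--             return absolutes[lo] if signs[lo] else -absolutes[lo]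
--         mid = (lo + hi) // 2
--         return go(lo, mid) + go(mid, hi)
--     return go(0, len(absolutes))
-- ===== Notes on version B (the rewrite author's own statement) =====
-- stated objective: alternative
-- what changed: Replaces A's single left-to-right conditional accumulation over enumerate by a divide-and-conquer recursion that splits the index range in half and adds the signed sums of the two halves (correct since integer addition is associative and commutative, so summation order is irrelevant).
import Mathlib
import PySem

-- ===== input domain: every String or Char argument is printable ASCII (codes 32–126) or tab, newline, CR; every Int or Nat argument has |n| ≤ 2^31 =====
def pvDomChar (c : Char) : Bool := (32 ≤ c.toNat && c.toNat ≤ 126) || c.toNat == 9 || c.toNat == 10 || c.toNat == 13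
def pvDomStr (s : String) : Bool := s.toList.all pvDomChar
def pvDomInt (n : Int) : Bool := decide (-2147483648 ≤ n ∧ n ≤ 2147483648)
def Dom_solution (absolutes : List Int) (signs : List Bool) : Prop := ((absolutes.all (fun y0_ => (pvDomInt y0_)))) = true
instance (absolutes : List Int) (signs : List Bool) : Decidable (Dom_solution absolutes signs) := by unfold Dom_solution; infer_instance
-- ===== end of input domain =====

-- B replaces A's left-to-right conditional accumulation by a divide-and-conquer recursion over the index range (alternative decomposition).

-- ===== PORT A =====
-- A: for i, n in enumerate(absolutes): sum_val += n if signs[i] else sum_val -= n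
-- signs[i] is ported with pyGet? (none = IndexError); Pre_ keeps indices in range, so .getD false never fires there.
def solution (absolutes : List Int) (signs : List Bool) : Int :=
  (PySem.List.enumerate absolutes 0).foldl
    (fun sum_val p =>
      if (PySem.List.pyGet? signs p.1).getD false then sum_val + p.2 else sum_val - p.2) 0

-- ===== PORT B =====
-- B's helper go(lo, hi): signed sum of the segment [lo, hi), splitting at mid = (lo+hi)//2.
def pvGoAlt (absolutes : List Int) (signs : List Bool) (lo hi : Int) : Int :=
  if hi - lo ≤ 0 then 0
  else if hi - lo = 1 then
    (if (PySem.List.pyGet? signs lo).getD false then (PySem.List.pyGet? absolutes lo).getD 0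
     else -((PySem.List.pyGet? absolutes lo).getD 0))
  else
    pvGoAlt absolutes signs lo (PySem.Int.floordiv (lo + hi) 2) +
    pvGoAlt absolutes signs (PySem.Int.floordiv (lo + hi) 2) hi
termination_by (hi - lo).toNat
decreasing_by
  · have h2 := PySem.Int.floordiv_eq_ediv_of_pos (a := lo + hi) (b := 2) (by omega)
    omega
  · have h2 := PySem.Int.floordiv_eq_ediv_of_pos (a := lo + hi) (b := 2) (by omega)
    omega

def solution_alt (absolutes : List Int) (signs : List Bool) : Int :=
  pvGoAlt absolutes signs 0 absolutes.length

-- ===== PRECONDITION & SPEC =====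
-- Pre_ excludes exactly the inputs where Python A raises IndexError: signs shorter than absolutes.
def Pre_solution (absolutes : List Int) (signs : List Bool) : Prop :=
  absolutes.length ≤ signs.length
instance (absolutes : List Int) (signs : List Bool) : Decidable (Pre_solution absolutes signs) := by
  unfold Pre_solution; infer_instance

def pvWitness_solution : List Int × List Bool := ([4, 7, 12], [true, false, true])

def Spec_solution (absolutes : List Int) (signs : List Bool) (out : Int) : Prop := out = solution_alt absolutes signs
instance (absolutes : List Int) (signs : List Bool) (out : Int) : Decidable (Spec_solution absolutes signs out) := by unfold Spec_solution; infer_instance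

-- ===== CLAIM (what is proved, stated in full; the proofs are below) =====
def Claim_equal_solution : Prop := ∀ (absolutes : List Int) (signs : List Bool), Dom_solution absolutes signs → Pre_solution absolutes signs → Spec_solution absolutes signs (solution absolutes signs)

-- ===== LEMMAS AND PROOFS =====

-- signed value at index i (total, via the same pyGet? defaults as the ports)
def pvIdx (absolutes : List Int) (signs : List Bool) (i : Int) : Int :=
  if (PySem.List.pyGet? signs i).getD false then (PySem.List.pyGet? absolutes i).getD 0
  else -((PySem.List.pyGet? absolutes i).getD 0)

-- signed sum, structurally on both lists
def pvS : List Int → List Bool → Int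
  | [], _ => 0
  | _ :: _, [] => 0
  | a :: as, b :: bs => (if b then a else -a) + pvS as bs

lemma pyRange_one_split (a m b : Int) (h1 : a ≤ m) (h2 : m ≤ b) :
    PySem.List.pyRange a b 1 = PySem.List.pyRange a m 1 ++ PySem.List.pyRange m b 1 := by
  rw [PySem.List.pyRange_one, PySem.List.pyRange_one, PySem.List.pyRange_one]
  have hsum : (b - a).toNat = (m - a).toNat + (b - m).toNat := by omega
  rw [hsum, List.range_add, List.map_append, List.map_map]
  congr 1
  apply List.map_congr_left
  intro k _
  simp only [Function.comp_apply]
  omega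

lemma go_eq_sum (absolutes : List Int) (signs : List Bool) :
    ∀ n (lo hi : Int), (hi - lo).toNat = n →
      pvGoAlt absolutes signs lo hi
        = ((PySem.List.pyRange lo hi 1).map (pvIdx absolutes signs)).sum := by
  intro n
  induction n using Nat.strong_induction_on with
  | _ n ih =>
    intro lo hi hn
    rw [pvGoAlt]
    by_cases h0 : hi - lo ≤ 0
    · rw [if_pos h0, PySem.List.pyRange_one_eq_nil (by omega)]; simp
    rw [if_neg h0]
    by_cases h1 : hi - lo = 1
    · rw [if_pos h1, PySem.List.pyRange_one_cons (by omega), PySem.List.pyRange_one_eq_nil (by omega)]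
      simp [pvIdx]
    rw [if_neg h1]
    have hfd := PySem.Int.floordiv_eq_ediv_of_pos (a := lo + hi) (b := 2) (by omega)
    set mid := PySem.Int.floordiv (lo + hi) 2 with hmid
    have hb1 : lo < mid := by omega
    have hb2 : mid < hi := by omega
    rw [pyRange_one_split lo mid hi (by omega) (by omega), List.map_append, List.sum_append]
    rw [ih (mid - lo).toNat (by omega) lo mid rfl,
        ih (hi - mid).toNat (by omega) mid hi rfl]

lemma pvIdx_cons_shift (x : Int) (xs : List Int) (u : Bool) (us : List Bool) (k : ℕ) :
    pvIdx (x :: xs) (u :: us) ((k : Int) + 1) = pvIdx xs us (k : Int) := by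
  simp only [pvIdx, PySem.List.pyGet?_cons_succ]

lemma sum_idx_eq_pvS (absolutes : List Int) (signs : List Bool)
    (h : absolutes.length ≤ signs.length) :
    ((List.range absolutes.length).map (fun (k : ℕ) => pvIdx absolutes signs (k : Int))).sum
      = pvS absolutes signs := by
  induction absolutes generalizing signs with
  | nil => simp [pvS]
  | cons a as ihs =>
    cases signs with
    | nil => simp at h
    | cons sg rest =>
      simp only [List.length_cons, add_le_add_iff_right] at h
      rw [List.length_cons, List.range_succ_eq_map, List.map_cons, List.map_map,
          List.sum_cons]
      have hmap : (List.range as.length).map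
          ((fun (k : ℕ) => pvIdx (a :: as) (sg :: rest) (k : Int)) ∘ Nat.succ)
          = (List.range as.length).map (fun (k : ℕ) => pvIdx as rest (k : Int)) := by
        apply List.map_congr_left
        intro k _
        simp only [Function.comp_apply]
        have : ((k.succ : ℕ) : Int) = (k : Int) + 1 := by push_cast; ring
        rw [this, pvIdx_cons_shift]
      rw [hmap, ihs rest h, pvS]
      simp [pvIdx]

lemma shiftA (as : List Int) (s : ℕ) (sg : Bool) (rest : List Bool) (acc : Int) :
    (PySem.List.enumerate as ((s : Int) + 1)).foldl
      (fun sum_val p =>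
        if (PySem.List.pyGet? (sg :: rest) p.1).getD false then sum_val + p.2 else sum_val - p.2) acc
    = (PySem.List.enumerate as (s : Int)).foldl
      (fun sum_val p =>
        if (PySem.List.pyGet? rest p.1).getD false then sum_val + p.2 else sum_val - p.2) acc := by
  induction as generalizing s acc with
  | nil => simp [PySem.List.enumerate_nil]
  | cons x xs ih =>
    rw [PySem.List.enumerate_cons, PySem.List.enumerate_cons]
    simp only [List.foldl_cons, PySem.List.pyGet?_cons_succ]
    have hc : ((s : Int) + 1) + 1 = ((s + 1 : ℕ) : Int) + 1 := by push_cast; ring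
    have hc2 : (s : Int) + 1 = ((s + 1 : ℕ) : Int) := by push_cast; ring
    rw [hc, hc2, ih]

lemma A_eq (absolutes : List Int) (signs : List Bool) (acc : Int)
    (h : absolutes.length ≤ signs.length) :
    (PySem.List.enumerate absolutes 0).foldl
      (fun sum_val p =>
        if (PySem.List.pyGet? signs p.1).getD false then sum_val + p.2 else sum_val - p.2) acc
    = acc + pvS absolutes signs := by
  induction absolutes generalizing signs acc with
  | nil => simp [PySem.List.enumerate_nil, pvS]
  | cons a as ih =>
    cases signs with
    | nil => simp at h
    | cons sg rest =>
      simp only [List.length_cons, add_le_add_iff_right] at h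
      rw [PySem.List.enumerate_cons]
      simp only [List.foldl_cons, PySem.List.pyGet?_zero_cons, Option.getD_some]
      have h0 : (0 : Int) + 1 = ((0 : ℕ) : Int) + 1 := by norm_num
      rw [h0, shiftA, Int.natCast_zero, ih _ _ h, pvS]
      cases sg <;> simp <;> ring

-- ===== VERDICT (by name: the statement is the Claim_ definition above) =====
theorem solution_spec : Claim_equal_solution := by
  intro absolutes signs _ hpre
  unfold Spec_solution solution solution_alt
  rw [A_eq absolutes signs 0 hpre, zero_add,
      go_eq_sum absolutes signs ((absolutes.length : Int) - 0).toNat 0 absolutes.length rfl]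
  rw [PySem.List.pyRange_one, List.map_map]
  have hlen : ((absolutes.length : Int) - 0).toNat = absolutes.length := by omega
  rw [hlen]
  have hm : List.map (pvIdx absolutes signs ∘ fun (k : ℕ) => 0 + (k : Int)) (List.range absolutes.length)
      = List.map (fun (k : ℕ) => pvIdx absolutes signs (k : Int)) (List.range absolutes.length) := by
    apply List.map_congr_left
    intro k _
    simp
  rw [hm, sum_idx_eq_pvS absolutes signs hpre]
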